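-- pv_equiv track=rewrite | github.com/BlackSatan/simulation-modeling-queue-theory | one_channel_limit.py | executing_plot
-- ===== SOURCE A (Python) =====
-- def find_exec_time(arrival_time, exec_arr):
--     last_exec = exec_arr[-1]
--     return max(arrival_time, last_exec[1])
--
-- def system_run(incoming_dist, executing_dist, m):
--     result = []
--     time = 0
--     for index, inc in enumerate(incoming_dist):
--         exc = executing_dist[index]
--         if index == 0:
--             time += inc + exc
--             result.append([inc, inc + exc])
--         else:
--             arrival_time = sum(incoming_dist[:index])
--             start = find_exec_time(arrival_time, result)
--             queued_items_count = sum(list(map(lambda st: 1 if st[0] > arrival_time else 0, result)))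
--             if queued_items_count > m:
--                 continue
--             result.append([start, start + exc])
--     return result
--
-- def executing_plot(incoming_dist, executing_dist, m):
--     result = system_run(incoming_dist, executing_dist, m)
--     x = []
--     y = []
--     for index, coord in enumerate(result):
--         x.append(coord[1])
--         y.append(index)
--     return x, y
-- ===== SOURCE B (Python) =====
-- def executing_plot(incoming_dist, executing_dist, m):
--     # One fused pass: running prefix sum for arrival times and a descending-sorted
--     # list of start times, so the queued count is the length of its > arrival prefix.
--     starts_desc = []   # start times of accepted items, kept sorted descending
--     ends = []          # completion times, in acceptance order
--     prefix = 0         # sum of incoming_dist[:i]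
--     for i, inc in enumerate(incoming_dist):
--         exc = executing_dist[i]
--         if i == 0:
--             starts_desc = [inc]
--             ends.append(inc + exc)
--             prefix = inc
--         else:
--             arrival = prefix
--             prefix += inc
--             queued = 0
--             for s in starts_desc:
--                 if s > arrival:
--                     queued += 1
--                 else:
--                     break
--             if queued > m:
--                 continue
--             last = ends[-1]
--             start = arrival if arrival > last else last
--             pos = 0
--             while pos < len(starts_desc) and starts_desc[pos] > start:
--                 pos += 1
--             starts_desc.insert(pos, start)
--             ends.append(start + exc)
--     return ends, list(range(len(ends)))
-- ===== Notes on version B (the rewrite author's own statement) =====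
-- stated objective: faster
-- what changed: Replaces A's per-iteration O(n) re-summation of incoming_dist[:index] and O(n) scan of all accepted items by a single fused pass keeping a running prefix sum and a descending-sorted list of start times, so the queued count is just the length of the list's > arrival prefix.
import Mathlib
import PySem

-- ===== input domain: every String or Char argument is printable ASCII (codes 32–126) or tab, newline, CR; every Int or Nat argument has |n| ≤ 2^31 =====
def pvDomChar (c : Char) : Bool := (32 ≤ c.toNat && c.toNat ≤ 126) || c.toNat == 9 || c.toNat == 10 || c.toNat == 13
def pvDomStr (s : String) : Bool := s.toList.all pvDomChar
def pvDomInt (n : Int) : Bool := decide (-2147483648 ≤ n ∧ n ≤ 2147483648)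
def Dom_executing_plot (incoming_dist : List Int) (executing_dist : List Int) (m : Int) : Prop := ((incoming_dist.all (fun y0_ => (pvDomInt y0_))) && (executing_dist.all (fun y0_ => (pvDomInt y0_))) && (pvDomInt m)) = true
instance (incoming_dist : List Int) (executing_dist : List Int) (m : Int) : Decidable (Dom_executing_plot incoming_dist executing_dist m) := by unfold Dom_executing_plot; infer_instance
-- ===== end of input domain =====

-- B fuses everything into one pass with a running prefix sum and a descending-sorted
-- start-time list (faster: no per-iteration slice re-summation / full rescans).

-- ===== PORT A =====
-- exec_arr[-1] never fails when called (result is nonempty); default (0,0) is unreachable under Pre_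
def find_exec_time (arrival_time : Int) (exec_arr : List (Int × Int)) : Int :=
  let last_exec := PySem.List.pyGetD exec_arr (-1) (0, 0)
  max arrival_time last_exec.2

-- the for-loop of system_run, as structural recursion carrying (index, result, time)
def system_run_loop (incoming_dist executing_dist : List Int) (m : Int) :
    Nat → List Int → List (Int × Int) × Int → List (Int × Int) × Int
  | _, [], st => st
  | index, inc :: rest, (result, time) =>
    let exc := PySem.List.pyGetD executing_dist (index : Int) 0
    if index = 0 then
      system_run_loop incoming_dist executing_dist m (index + 1) rest
        (result ++ [(inc, inc + exc)], time + inc + exc)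
    else
      let arrival_time := (PySem.List.slice incoming_dist none (some (index : Int))).sum
      let start := find_exec_time arrival_time result
      let queued := (result.map (fun st => if st.1 > arrival_time then (1 : Int) else 0)).sum
      if queued > m then
        system_run_loop incoming_dist executing_dist m (index + 1) rest (result, time)
      else
        system_run_loop incoming_dist executing_dist m (index + 1) rest
          (result ++ [(start, start + exc)], time)

def system_run (incoming_dist executing_dist : List Int) (m : Int) : List (Int × Int) :=
  (system_run_loop incoming_dist executing_dist m 0 incoming_dist ([], 0)).1

-- the x/y building loop of executing_plot
def plot_loop : Nat → List (Int × Int) → List Int × List Int → List Int × List Int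
  | _, [], acc => acc
  | index, coord :: rest, (x, y) => plot_loop (index + 1) rest (x ++ [coord.2], y ++ [(index : Int)])

def executing_plot (incoming_dist : List Int) (executing_dist : List Int) (m : Int) : List Int × List Int :=
  let result := system_run incoming_dist executing_dist m
  plot_loop 0 result ([], [])

-- ===== PORT B =====
-- length of the maximal prefix of elements > a (B's early-break counting loop)
def pvCountGt (a : Int) : List Int → Int
  | [] => 0
  | s :: rest => if s > a then 1 + pvCountGt a rest else 0

-- B's insertion into the descending-sorted start list
def pvInsertDesc (x : Int) : List Int → List Int
  | [] => [x]
  | s :: rest => if s > x then s :: pvInsertDesc x rest else x :: s :: rest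

-- B's single fused loop: state (starts_desc, ends, prefix)
def alt_loop (executing_dist : List Int) (m : Int) :
    Nat → List Int → List Int × List Int × Int → List Int × List Int × Int
  | _, [], st => st
  | i, inc :: rest, (starts_desc, ends, pfx) =>
    let exc := PySem.List.pyGetD executing_dist (i : Int) 0
    if i = 0 then
      alt_loop executing_dist m (i + 1) rest ([inc], ends ++ [inc + exc], inc)
    else
      let arrival := pfx
      let pfx' := pfx + inc
      let queued := pvCountGt arrival starts_desc
      if queued > m then
        alt_loop executing_dist m (i + 1) rest (starts_desc, ends, pfx')
      else
        let last := PySem.List.pyGetD ends (-1) 0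
        let start := if arrival > last then arrival else last
        alt_loop executing_dist m (i + 1) rest
          (pvInsertDesc start starts_desc, ends ++ [start + exc], pfx')

def executing_plot_alt (incoming_dist : List Int) (executing_dist : List Int) (m : Int) : List Int × List Int :=
  let st := alt_loop executing_dist m 0 incoming_dist ([], [], 0)
  (st.2.1, PySem.List.pyRange 0 (st.2.1.length : Int) 1)

-- ===== PRECONDITION & SPEC =====
-- A indexes executing_dist[index] for every index below len(incoming_dist), so it raises
-- IndexError iff executing_dist is shorter than incoming_dist; exactly those inputs are excluded.
def Pre_executing_plot (incoming_dist : List Int) (executing_dist : List Int) (m : Int) : Prop :=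
  incoming_dist.length ≤ executing_dist.length
instance (incoming_dist : List Int) (executing_dist : List Int) (m : Int) : Decidable (Pre_executing_plot incoming_dist executing_dist m) := by unfold Pre_executing_plot; infer_instance

def pvWitness_executing_plot : List Int × List Int × Int := ([2, 1, 3], [4, 2, 1], 1)

def Spec_executing_plot (incoming_dist : List Int) (executing_dist : List Int) (m : Int) (out : List Int × List Int) : Prop := out = executing_plot_alt incoming_dist executing_dist m
instance (incoming_dist : List Int) (executing_dist : List Int) (m : Int) (out : List Int × List Int) : Decidable (Spec_executing_plot incoming_dist executing_dist m out) := by unfold Spec_executing_plot; infer_instance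

-- ===== CLAIM (what is proved, stated in full; the proofs are below) =====
def Claim_equal_executing_plot : Prop := ∀ (incoming_dist : List Int) (executing_dist : List Int) (m : Int), Dom_executing_plot incoming_dist executing_dist m → Pre_executing_plot incoming_dist executing_dist m → Spec_executing_plot incoming_dist executing_dist m (executing_plot incoming_dist executing_dist m)

-- ===== LEMMAS AND PROOFS =====

theorem pvInsertDesc_perm (x : Int) (l : List Int) : (pvInsertDesc x l).Perm (x :: l) := by
  induction l with
  | nil => simp [pvInsertDesc]
  | cons s rest ih =>
    simp only [pvInsertDesc]
    split_ifs with h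
    · exact ((ih.cons s).trans (List.Perm.swap x s rest))
    · exact List.Perm.refl _

theorem pvInsertDesc_sorted (x : Int) (l : List Int) (h : List.Pairwise (· ≥ ·) l) :
    List.Pairwise (· ≥ ·) (pvInsertDesc x l) := by
  induction l with
  | nil => simp [pvInsertDesc]
  | cons s rest ih =>
    rw [List.pairwise_cons] at h
    simp only [pvInsertDesc]
    split_ifs with hgt
    · rw [List.pairwise_cons]
      refine ⟨fun b hb => ?_, ih h.2⟩
      rcases List.mem_cons.mp ((pvInsertDesc_perm x rest).mem_iff.mp hb) with hb | hb
      · subst hb; omega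
      · exact h.1 b hb
    · rw [List.pairwise_cons]
      refine ⟨fun b hb => ?_, List.pairwise_cons.mpr h⟩
      rcases List.mem_cons.mp hb with hb | hb
      · omega
      · have := h.1 b hb; omega

theorem pvCountGt_sorted (a : Int) (l : List Int) (h : List.Pairwise (· ≥ ·) l) :
    pvCountGt a l = (l.countP (fun s => decide (a < s)) : Int) := by
  induction l with
  | nil => simp [pvCountGt]
  | cons s rest ih =>
    rw [List.pairwise_cons] at h
    simp only [pvCountGt]
    split_ifs with hgt
    · have hd : (decide (a < s)) = true := by simpa using hgt
      rw [List.countP_cons, ih h.2, hd]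
      simp only [if_true]
      push_cast; ring
    · have hzero : rest.countP (fun s => decide (a < s)) = 0 := by
        rw [List.countP_eq_zero]
        intro b hb
        have := h.1 b hb
        simp only [decide_eq_true_eq]; omega
      have hd : (decide (a < s)) = false := by simpa using hgt
      rw [List.countP_cons, hzero, hd]
      simp

-- A's 0/1-indicator sum over result equals countP over the projected start list
theorem sum_ite_eq_countP (a : Int) (result : List (Int × Int)) :
    (result.map (fun st => if st.1 > a then (1 : Int) else 0)).sum
      = ((result.map Prod.fst).countP (fun s => decide (a < s)) : Int) := by
  induction result with
  | nil => simp
  | cons p rest ih =>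
    simp only [List.map_cons, List.sum_cons, List.countP_cons, ih]
    by_cases h : a < p.1
    · simp [h]; omega
    · have : ¬ p.1 > a := h
      simp [this]

-- last element of ends agrees with the second component of result's last element
theorem last_ends (result : List (Int × Int)) (h : result ≠ []) :
    PySem.List.pyGetD (result.map Prod.snd) (-1) 0 = (PySem.List.pyGetD result (-1) ((0 : Int), (0 : Int))).2 := by
  have h' : result.map Prod.snd ≠ [] := by simpa using h
  rw [PySem.List.pyGetD_neg_one _ _ h', PySem.List.pyGetD_neg_one _ _ h, List.getLast_map]

-- main loop invariant: B's loop tracks A's loop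
theorem loop_eq (incoming_dist executing_dist : List Int) (m : Int) :
    ∀ (rest : List Int) (index : Nat) (result : List (Int × Int)) (starts ends : List Int)
      (time pfx : Int),
      1 ≤ index →
      incoming_dist.drop index = rest →
      ends = result.map Prod.snd →
      result ≠ [] →
      starts.Perm (result.map Prod.fst) →
      List.Pairwise (· ≥ ·) starts →
      pfx = (incoming_dist.take index).sum →
      (alt_loop executing_dist m index rest (starts, ends, pfx)).2.1
        = ((system_run_loop incoming_dist executing_dist m index rest (result, time)).1).map Prod.snd := by
  intro rest
  induction rest with
  | nil =>
    intro index result starts ends time pfx _ _ hends _ _ _ _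
    simpa [alt_loop, system_run_loop] using hends
  | cons inc rest ih =>
    intro index result starts ends time pfx hidx hdrop hends hne hperm hsort hpre
    have hidx0 : index ≠ 0 := by omega
    have htake : incoming_dist.take (index + 1) = incoming_dist.take index ++ [inc] := by
      have : incoming_dist.take (index + 1) = incoming_dist.take index ++ (incoming_dist.drop index).take 1 := by
        rw [← List.take_add]
      rw [this, hdrop]; rfl
    have hdrop' : incoming_dist.drop (index + 1) = rest := by
      have : incoming_dist.drop (index + 1) = (incoming_dist.drop index).drop 1 := by
        rw [List.drop_drop]
      rw [this, hdrop]; rfl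
    have harr : (PySem.List.slice incoming_dist none (some (index : Int))).sum = pfx := by
      rw [PySem.List.slice_to_natCast, hpre]
    simp only [alt_loop, system_run_loop, if_neg hidx0]
    rw [harr]
    have hcount : pvCountGt pfx starts
        = (result.map (fun st => if st.1 > pfx then (1 : Int) else 0)).sum := by
      rw [pvCountGt_sorted _ _ hsort, hperm.countP_eq, sum_ite_eq_countP]
    rw [hcount]
    by_cases hq : (result.map (fun st => if st.1 > pfx then (1 : Int) else 0)).sum > m
    · rw [if_pos hq, if_pos hq]
      exact ih (index + 1) result starts ends time (pfx + inc) (by omega) hdrop' hends hne hperm hsort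
        (by rw [htake, List.sum_append, hpre]; simp)
    · rw [if_neg hq, if_neg hq]
      have hstart : (if pfx > PySem.List.pyGetD ends (-1) 0 then pfx
            else PySem.List.pyGetD ends (-1) 0) = find_exec_time pfx result := by
        rw [hends, last_ends result hne]
        simp only [find_exec_time, max_def]
        split_ifs <;> omega
      rw [hstart]
      set s := find_exec_time pfx result with hs
      exact ih (index + 1) (result ++ [(s, s + PySem.List.pyGetD executing_dist (index : Int) 0)])
        (pvInsertDesc s starts)
        (ends ++ [s + PySem.List.pyGetD executing_dist (index : Int) 0]) time (pfx + inc)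
        (by omega) hdrop' (by rw [hends]; simp) (by simp)
        (by
          have h1 : (pvInsertDesc s starts).Perm (s :: starts) := pvInsertDesc_perm s starts
          have h2 : (s :: starts).Perm (s :: result.map Prod.fst) := hperm.cons s
          have h3 : (s :: result.map Prod.fst).Perm (result.map Prod.fst ++ [s]) := by
            simpa using (List.perm_append_singleton s (result.map Prod.fst)).symm
          have h4 : ((result ++ [(s, s + PySem.List.pyGetD executing_dist (index : Int) 0)]).map Prod.fst)
              = result.map Prod.fst ++ [s] := by simp
          rw [h4]
          exact (h1.trans h2).trans h3)
        (pvInsertDesc_sorted s starts hsort)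
        (by rw [htake, List.sum_append, hpre]; simp)

-- the final x/y building loop of A, characterised
theorem plot_loop_eq (result : List (Int × Int)) :
    ∀ (j : Nat) (x y : List Int),
      plot_loop j result (x, y)
        = (x ++ result.map Prod.snd, y ++ (List.range result.length).map (fun k => ((j + k : Nat) : Int))) := by
  induction result with
  | nil => intro j x y; simp [plot_loop]
  | cons c rest ih =>
    intro j x y
    simp only [plot_loop]
    rw [ih (j + 1) (x ++ [c.2]) (y ++ [(j : Int)])]
    have hy : List.map (fun k => ((j + k : Nat) : Int)) (List.range (rest.length + 1))
        = (j : Int) :: List.map (fun k => ((j + 1 + k : Nat) : Int)) (List.range rest.length) := by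
      rw [List.range_succ_eq_map, List.map_cons, List.map_map]
      refine congrArg₂ List.cons (by simp) (List.map_congr_left ?_)
      intro k _
      simp only [Function.comp_apply]
      congr 1
      omega
    rw [List.length_cons, hy]
    simp only [List.append_assoc, List.cons_append, List.nil_append, List.map_cons]

-- ===== VERDICT (by name: the statement is the Claim_ definition above) =====
theorem executing_plot_spec : Claim_equal_executing_plot := by
  intro incoming_dist executing_dist m _ _
  unfold Spec_executing_plot executing_plot executing_plot_alt system_run
  cases incoming_dist with
  | nil => simp [system_run_loop, alt_loop, plot_loop, PySem.List.pyRange]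
  | cons inc rest =>
    simp only [system_run_loop, alt_loop, if_true]
    have hA := loop_eq (inc :: rest) executing_dist m rest 1
      [(inc, inc + PySem.List.pyGetD executing_dist ((0 : Nat) : Int) 0)]
      [inc] [inc + PySem.List.pyGetD executing_dist ((0 : Nat) : Int) 0]
      (0 + inc + PySem.List.pyGetD executing_dist ((0 : Nat) : Int) 0) inc
      (by omega) rfl (by simp) (by simp) (by simp) (by simp) (by simp)
    rw [plot_loop_eq]
    refine Prod.ext (by simpa using hA.symm) ?_
    simp only [zero_add, List.nil_append]
    rw [hA, PySem.List.pyRange_one]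
    simp
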